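-- pv_equiv track=rewrite | github.com/Arvind543/SQLServer_DBA_Scripts | Exp_DBUsersFor_Refresh.py | generate_sql_script
-- ===== SOURCE A (Python) =====
-- def generate_sql_script(users_permissions):
--     script_lines = []
--
--     current_user = None
--     for row in users_permissions:
--         user_name, type_desc, create_date, modify_date, permission_name, state_desc, object_name = row
--
--         if user_name != current_user:
--             if current_user:
--                 script_lines.append("\n")
--             script_lines.append(f"-- User: {user_name}\n")
--             script_lines.append(f"CREATE USER [{user_name}];\n")
--             current_user = user_name
--
--         if permission_name:
--             object_clause = f" ON [{object_name}]" if object_name else ""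
--             script_lines.append(f"GRANT {permission_name} TO [{user_name}]{object_clause};\n")
--
--     return script_lines
-- ===== SOURCE B (Python) =====
-- def _groups(rows):
--     # Stage 1: run-length grouping of consecutive rows by user_name
--     gs = []
--     i, n = 0, len(rows)
--     while i < n:
--         u = rows[i][0]
--         j = i + 1
--         while j < n and rows[j][0] == u:
--             j += 1
--         gs.append((u, rows[i:j]))
--         i = j
--     return gs
--
--
-- def _grants(user, rows):
--     lines = []
--     for row in rows:
--         perm, obj = row[4], row[6]
--         if perm:
--             clause = f" ON [{obj}]" if obj else ""
--             lines.append(f"GRANT {perm} TO [{user}]{clause};\n")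
--     return lines
--
--
-- def _block(prev, user, rows):
--     head = []
--     if user != prev:
--         if prev:
--             head.append("\n")
--         head.append(f"-- User: {user}\n")
--         head.append(f"CREATE USER [{user}];\n")
--     return head + _grants(user, rows)
--
--
-- def generate_sql_script(users_permissions):
--     # Stage 2: render one block per group
--     out = []
--     prev = None
--     for user, rows in _groups(list(users_permissions)):
--         out += _block(prev, user, rows)
--         prev = user
--     return out
-- ===== Notes on version B (the rewrite author's own statement) =====
-- stated objective: alternative
-- what changed: Replaces A's single stateful row loop by a two-stage algorithm: first run-length grouping of consecutive rows by user_name, then rendering one header+grants block per group.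
import Mathlib
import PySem

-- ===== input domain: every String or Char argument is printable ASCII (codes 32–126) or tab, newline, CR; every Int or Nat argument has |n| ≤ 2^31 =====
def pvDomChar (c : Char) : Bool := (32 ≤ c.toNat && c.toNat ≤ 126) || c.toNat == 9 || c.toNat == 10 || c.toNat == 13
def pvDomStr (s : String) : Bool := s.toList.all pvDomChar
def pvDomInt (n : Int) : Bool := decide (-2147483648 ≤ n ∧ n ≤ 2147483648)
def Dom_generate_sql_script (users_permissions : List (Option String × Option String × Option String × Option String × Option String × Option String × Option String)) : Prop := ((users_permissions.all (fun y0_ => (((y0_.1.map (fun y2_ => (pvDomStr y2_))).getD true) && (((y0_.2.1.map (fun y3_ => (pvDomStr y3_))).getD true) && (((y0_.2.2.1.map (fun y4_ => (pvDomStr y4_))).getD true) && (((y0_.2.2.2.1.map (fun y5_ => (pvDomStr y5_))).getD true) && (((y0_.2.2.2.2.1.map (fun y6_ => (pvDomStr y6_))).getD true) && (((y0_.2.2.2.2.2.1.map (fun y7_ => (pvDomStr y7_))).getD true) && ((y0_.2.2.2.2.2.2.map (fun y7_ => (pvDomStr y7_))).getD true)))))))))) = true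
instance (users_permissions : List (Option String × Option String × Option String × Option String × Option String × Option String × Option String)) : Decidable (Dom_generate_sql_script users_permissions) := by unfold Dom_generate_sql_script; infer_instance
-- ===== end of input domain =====

-- B restructures A's single stateful row loop into two stages — run-length grouping of
-- consecutive rows by user, then rendering one block per group; objective: alternative, same cost.

abbrev PvRow := Option String × Option String × Option String × Option String × Option String × Option String × Option String

-- str(x) for an Optional[str]: None prints as "None" in an f-string
def pvOptStr (o : Option String) : String := match o with | none => "None" | some s => s
-- Python truthiness of an Optional[str]
def pvTruthy (o : Option String) : Bool := match o with | none => false | some s => !(s == "")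

-- ===== PORT A =====
-- one iteration of A's loop body; state = (script_lines, current_user)
def pvStepA (st : List String × Option String) (row : PvRow) : List String × Option String :=
  let user_name := row.1
  let permission_name := row.2.2.2.2.1
  let object_name := row.2.2.2.2.2.2
  let st' : List String × Option String :=
    if user_name ≠ st.2 then
      ((st.1 ++ (if pvTruthy st.2 then ["\n"] else [])) ++
        ["-- User: " ++ pvOptStr user_name ++ "\n",
         "CREATE USER [" ++ pvOptStr user_name ++ "];\n"], user_name)
    else st
  if pvTruthy permission_name then
    (st'.1 ++ ["GRANT " ++ pvOptStr permission_name ++ " TO [" ++ pvOptStr user_name ++ "]" ++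
       (if pvTruthy object_name then " ON [" ++ pvOptStr object_name ++ "]" else "") ++ ";\n"], st'.2)
  else st'

def generate_sql_script (users_permissions : List PvRow) : List String :=
  (users_permissions.foldl pvStepA ([], none)).1

-- ===== PORT B =====
-- _span_group + _groups: run-length grouping of consecutive rows sharing a user_name
def pvGroups : List PvRow → List (Option String × List PvRow)
  | [] => []
  | r :: rs =>
      (r.1, r :: rs.takeWhile (fun x => x.1 == r.1)) :: pvGroups (rs.dropWhile (fun x => x.1 == r.1))
termination_by l => l.length
decreasing_by
  simp only [List.length_cons]
  have := List.length_dropWhile_le (fun x : PvRow => x.1 == r.1) rs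
  omega

-- _grants: the GRANT line of one row (empty if permission_name is falsy)
def pvGrant (user : Option String) (row : PvRow) : List String :=
  let permission_name := row.2.2.2.2.1
  let object_name := row.2.2.2.2.2.2
  if pvTruthy permission_name then
    ["GRANT " ++ pvOptStr permission_name ++ " TO [" ++ pvOptStr user ++ "]" ++
       (if pvTruthy object_name then " ON [" ++ pvOptStr object_name ++ "]" else "") ++ ";\n"]
  else []

-- _block: header (when the group user differs from the previous group's user) plus the grants
def pvBlock (prev user : Option String) (rows : List PvRow) : List String :=
  (if user ≠ prev then
     (if pvTruthy prev then ["\n"] else []) ++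
     ["-- User: " ++ pvOptStr user ++ "\n", "CREATE USER [" ++ pvOptStr user ++ "];\n"]
   else []) ++
  rows.flatMap (pvGrant user)

-- the stage-2 loop: state = (out, prev)
def pvStepB (st : List String × Option String) (g : Option String × List PvRow) :
    List String × Option String :=
  (st.1 ++ pvBlock st.2 g.1 g.2, g.1)

def generate_sql_script_alt (users_permissions : List PvRow) : List String :=
  ((pvGroups users_permissions).foldl pvStepB ([], none)).1

-- ===== PRECONDITION & SPEC =====
def Spec_generate_sql_script (users_permissions : List PvRow) (out : List String) : Prop := out = generate_sql_script_alt users_permissions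
instance (users_permissions : List PvRow) (out : List String) : Decidable (Spec_generate_sql_script users_permissions out) := by unfold Spec_generate_sql_script; infer_instance

-- ===== CLAIM (what is proved, stated in full; the proofs are below) =====
def Claim_equal_generate_sql_script : Prop := ∀ (users_permissions : List (Option String × Option String × Option String × Option String × Option String × Option String × Option String)), Dom_generate_sql_script users_permissions → Spec_generate_sql_script users_permissions (generate_sql_script users_permissions)

-- ===== LEMMAS AND PROOFS =====

-- one step of A's loop appends exactly the header (relative to its current_user) and the
-- row's grant line, and leaves current_user = the row's user_name
theorem pvStepA_eq (lines : List String) (cu : Option String) (row : PvRow) :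
    pvStepA (lines, cu) row =
      (lines ++ ((if row.1 ≠ cu then
          (if pvTruthy cu then ["\n"] else []) ++
          ["-- User: " ++ pvOptStr row.1 ++ "\n", "CREATE USER [" ++ pvOptStr row.1 ++ "];\n"]
        else []) ++ pvGrant row.1 row), row.1) := by
  unfold pvStepA pvGrant
  by_cases h : row.1 = cu <;> simp [h] <;> split_ifs <;> simp

-- A's loop over a same-user run emits exactly the grant lines
theorem foldA_grants (grp : List PvRow) (u : Option String) (L : List String)
    (h : ∀ x ∈ grp, x.1 = u) :
    grp.foldl pvStepA (L, u) = (L ++ grp.flatMap (pvGrant u), u) := by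
  induction grp generalizing L with
  | nil => simp
  | cons x xs ih =>
      have hx : x.1 = u := h x (by simp)
      simp only [List.foldl_cons, pvStepA_eq, hx]
      rw [ih _ (fun y hy => h y (by simp [hy]))]
      simp

-- A's whole fold equals B's fold over the run-length groups
theorem foldA_eq_foldB (ups : List PvRow) (L : List String) (cu : Option String) :
    (ups.foldl pvStepA (L, cu)).1 = ((pvGroups ups).foldl pvStepB (L, cu)).1 := by
  induction ups using pvGroups.induct generalizing L cu with
  | case1 => simp [pvGroups]
  | case2 r rs ih =>
      have hsplit := List.takeWhile_append_dropWhile (p := fun x : PvRow => x.1 == r.1) (l := rs)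
      conv_lhs => rw [← hsplit]
      rw [pvGroups]
      simp only [List.foldl_cons, List.foldl_append, pvStepA_eq, pvStepB, pvBlock]
      rw [foldA_grants _ r.1 _ (fun x hx => by
        have := List.mem_takeWhile_imp hx
        simpa using this)]
      rw [ih]
      simp

-- ===== VERDICT (by name: the statement is the Claim_ definition above) =====
theorem generate_sql_script_spec : Claim_equal_generate_sql_script := by
  intro ups _
  unfold Spec_generate_sql_script generate_sql_script generate_sql_script_alt
  exact foldA_eq_foldB ups [] none
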